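-- pv_equiv track=rewrite | github.com/tgsoon2002/AICLass | Rule.py | RookHasLOS
-- ===== SOURCE A (Python) =====
-- def RookHasLOS(myPieces, opponentPieces, startCoor, targetCoor):
--     # Return true if path from start coord to target coord is clear
--     # This mean no piece (self or opponent) is obstructing the path
--     # between the starting point of the rook to the target coord
--     begin = startCoor
--     end = targetCoor
--     coordToCheck = []
--
--     # When moving from large to small, then switch begin/end to make it
--     # easy to compute
--     if startCoor[1] > targetCoor[1] or startCoor[0] > targetCoor[0]:
--         begin = targetCoor
--         end = startCoor
--
--     # Determine the direction of movement (horizontal or vertical)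
--     if begin[0] == end[0]:
--         # horizontal move. generate the coordinate X,y1 X,y2...
--         coordToCheck = [ (begin[0], y) for y in range (begin[1]+1, end[1]) ]
--
--     if begin[1] == end[1]:
--         # vertical move.  Generate the coordinate x1,Y x2,Y ...
--         coordToCheck = [ (x, begin[1]) for x in range (begin[0]+1, end[0]) ]
--     # Loop through the coordToCheck and verify against the board
--     # to make sure that it's all empty.  coordToCheck only contains coordinate
--     # between start and target and not included start or target
--     a = {**myPieces, **opponentPieces}
--     for coord in coordToCheck:
--         if coord in a:
--             return False
--
--     # Rook has a clear line of sight
--     return True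
-- ===== SOURCE B (Python) =====
-- def RookHasLOS(myPieces, opponentPieces, startCoor, targetCoor):
--     # B: scan the pieces themselves instead of generating path squares.
--     sx, sy = startCoor
--     tx, ty = targetCoor
--     if sx == tx:
--         lo, hi = (sy, ty) if sy < ty else (ty, sy)
--         for (px, py) in list(myPieces) + list(opponentPieces):
--             if px == sx and lo < py < hi:
--                 return False
--         return True
--     elif sy == ty:
--         lo, hi = (sx, tx) if sx < tx else (tx, sx)
--         for (px, py) in list(myPieces) + list(opponentPieces):
--             if py == sy and lo < px < hi:
--                 return False
--         return True
--     else: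
--         return True
-- ===== Notes on version B (the rewrite author's own statement) =====
-- stated objective: alternative
-- what changed: B never materialises the path: instead of generating every square between the endpoints and testing membership in a merged dict, it detects the shared axis and scans the pieces once, checking whether any piece sits on that axis strictly between the endpoints.
import Mathlib
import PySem

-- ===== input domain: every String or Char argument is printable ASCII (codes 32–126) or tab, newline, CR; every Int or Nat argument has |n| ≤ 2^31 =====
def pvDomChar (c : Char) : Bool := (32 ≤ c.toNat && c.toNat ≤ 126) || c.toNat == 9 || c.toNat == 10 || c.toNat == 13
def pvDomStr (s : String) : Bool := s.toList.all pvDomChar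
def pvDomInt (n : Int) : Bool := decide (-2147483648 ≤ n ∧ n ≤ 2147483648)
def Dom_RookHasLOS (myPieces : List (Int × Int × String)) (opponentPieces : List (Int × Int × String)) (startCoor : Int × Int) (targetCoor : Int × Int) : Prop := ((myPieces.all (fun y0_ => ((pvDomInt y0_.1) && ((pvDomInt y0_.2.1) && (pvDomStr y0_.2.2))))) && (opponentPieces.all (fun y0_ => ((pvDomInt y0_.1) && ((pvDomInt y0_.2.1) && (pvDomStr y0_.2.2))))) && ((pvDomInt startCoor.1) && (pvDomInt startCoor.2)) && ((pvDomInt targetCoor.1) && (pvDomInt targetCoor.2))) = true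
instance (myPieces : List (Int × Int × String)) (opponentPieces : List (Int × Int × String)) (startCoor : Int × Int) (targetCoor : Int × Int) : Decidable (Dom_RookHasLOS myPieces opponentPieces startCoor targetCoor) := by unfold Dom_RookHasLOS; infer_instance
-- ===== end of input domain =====

-- B scans the pieces once along the shared axis instead of generating every path square and testing dict membership; same results on all inputs.


-- ===== PORT A =====
-- literal transliteration of A: swap endpoints, build the list of intermediate
-- squares, merge the two piece dicts, return False on the first occupied square
def RookHasLOS (myPieces : List (Int × Int × String)) (opponentPieces : List (Int × Int × String)) (startCoor : Int × Int) (targetCoor : Int × Int) : Bool :=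
  let swap := decide (startCoor.2 > targetCoor.2) || decide (startCoor.1 > targetCoor.1)
  let b := if swap then targetCoor else startCoor
  let e := if swap then startCoor else targetCoor
  let coordToCheck : List (Int × Int) := []
  let coordToCheck := if b.1 = e.1 then (PySem.List.pyRange (b.2 + 1) e.2 1).map (fun y => (b.1, y)) else coordToCheck
  let coordToCheck := if b.2 = e.2 then (PySem.List.pyRange (b.1 + 1) e.1 1).map (fun x => (x, b.2)) else coordToCheck
  let a : PySem.Dict (Int × Int) String :=
    opponentPieces.foldl (fun d p => d.insert (p.1, p.2.1) p.2.2)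
      (myPieces.foldl (fun d p => d.insert (p.1, p.2.1) p.2.2) PySem.Dict.empty)
  !coordToCheck.any (fun c => a.contains c)

-- ===== PORT B =====
def RookHasLOS_alt (myPieces : List (Int × Int × String)) (opponentPieces : List (Int × Int × String)) (startCoor : Int × Int) (targetCoor : Int × Int) : Bool :=
  if startCoor.1 = targetCoor.1 then
    let lohi := if startCoor.2 < targetCoor.2 then (startCoor.2, targetCoor.2) else (targetCoor.2, startCoor.2)
    !((myPieces ++ opponentPieces).any (fun p =>
        p.1 == startCoor.1 && decide (lohi.1 < p.2.1) && decide (p.2.1 < lohi.2)))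
  else if startCoor.2 = targetCoor.2 then
    let lohi := if startCoor.1 < targetCoor.1 then (startCoor.1, targetCoor.1) else (targetCoor.1, startCoor.1)
    !((myPieces ++ opponentPieces).any (fun p =>
        p.2.1 == startCoor.2 && decide (lohi.1 < p.1) && decide (p.1 < lohi.2)))
  else
    true

-- ===== PRECONDITION & SPEC =====
def Spec_RookHasLOS (myPieces : List (Int × Int × String)) (opponentPieces : List (Int × Int × String)) (startCoor : Int × Int) (targetCoor : Int × Int) (out : Bool) : Prop := out = RookHasLOS_alt myPieces opponentPieces startCoor targetCoor
instance (myPieces : List (Int × Int × String)) (opponentPieces : List (Int × Int × String)) (startCoor : Int × Int) (targetCoor : Int × Int) (out : Bool) : Decidable (Spec_RookHasLOS myPieces opponentPieces startCoor targetCoor out) := by unfold Spec_RookHasLOS; infer_instance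

-- ===== CLAIM (what is proved, stated in full; the proofs are below) =====
def Claim_equal_RookHasLOS : Prop := ∀ (myPieces : List (Int × Int × String)) (opponentPieces : List (Int × Int × String)) (startCoor : Int × Int) (targetCoor : Int × Int), Dom_RookHasLOS myPieces opponentPieces startCoor targetCoor → Spec_RookHasLOS myPieces opponentPieces startCoor targetCoor (RookHasLOS myPieces opponentPieces startCoor targetCoor)

-- ===== LEMMAS AND PROOFS =====

-- dict membership after folding inserts = key present in the list
lemma contains_foldl_insert (l : List (Int × Int × String)) (d : PySem.Dict (Int × Int) String) (k : Int × Int) :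
    (l.foldl (fun d p => d.insert (p.1, p.2.1) p.2.2) d).contains k
      = (d.contains k || l.any (fun p => k == (p.1, p.2.1))) := by
  induction l generalizing d with
  | nil => simp
  | cons p t ih =>
      simp [List.foldl_cons, ih, PySem.Dict.contains_insert]
      cases d.contains k <;> cases (k == (p.1, p.2.1)) <;> simp

-- any over the generated vertical path squares = any over the pieces
lemma vert_any (l : List (Int × Int × String)) (x lo hi : Int) :
    ((PySem.List.pyRange (lo + 1) hi 1).map (fun y => ((x, y) : Int × Int))).any
        (fun c => l.any (fun p => c == (p.1, p.2.1)))
      = l.any (fun p => p.1 == x && decide (lo < p.2.1) && decide (p.2.1 < hi)) := by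
  rw [Bool.eq_iff_iff]
  simp [List.any_eq_true, PySem.List.mem_pyRange_one, Prod.ext_iff]
  tauto

-- any over the generated horizontal path squares = any over the pieces
lemma horiz_any (l : List (Int × Int × String)) (y lo hi : Int) :
    ((PySem.List.pyRange (lo + 1) hi 1).map (fun x => ((x, y) : Int × Int))).any
        (fun c => l.any (fun p => c == (p.1, p.2.1)))
      = l.any (fun p => p.2.1 == y && decide (lo < p.1) && decide (p.1 < hi)) := by
  rw [Bool.eq_iff_iff]
  simp [List.any_eq_true, PySem.List.mem_pyRange_one, Prod.ext_iff]
  tauto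

-- ===== VERDICT (by name: the statement is the Claim_ definition above) =====
theorem RookHasLOS_spec : Claim_equal_RookHasLOS := by
  intro my opp s t _
  show RookHasLOS my opp s t = RookHasLOS_alt my opp s t
  obtain ⟨sx, sy⟩ := s
  obtain ⟨tx, ty⟩ := t
  simp only [RookHasLOS, RookHasLOS_alt, contains_foldl_insert, PySem.Dict.contains_empty,
    Bool.false_or, ← List.any_append]
  split_ifs <;> (try rw [vert_any]) <;> (try rw [horiz_any]) <;>
    solve
    | rfl
    | simp_all
    | (simp_all; omega)
    | (refine congrArg Bool.not (PySem.List.any_congr_mem ?_)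
       intro p hp
       rw [Bool.eq_iff_iff]
       dsimp only at *
       simp only [Bool.and_eq_true, decide_eq_true_eq, beq_iff_eq, Bool.or_eq_true,
         not_lt, gt_iff_lt] at *
       omega)
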